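-- pv_equiv track=rewrite | github.com/materialsproject/MPContribs | mpcontribs-portal/notebooks/ml.materialsproject.cloud/matbench_upload.py | pretty_column_map
-- ===== SOURCE A (Python) =====
-- def pretty_column_map(columns_old):
--     colmap = {}
--     for col in columns_old:
--         k = (
--             col.replace("_", "|")
--             .replace("-", "|")
--             .replace(" ", "||")
--             .replace("(", " ")
--             .replace(")", "")
--         )
--         colmap[col] = k
--     return colmap
-- ===== SOURCE B (Python) =====
-- def _pretty(col):
--     pieces = []
--     for c in col:
--         if c == "_" or c == "-":
--             pieces.append("|")
--         elif c == " ":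
--             pieces.append("||")
--         elif c == "(":
--             pieces.append(" ")
--         elif c == ")":
--             continue
--         else:
--             pieces.append(c)
--     return "".join(pieces)
--
--
-- def pretty_column_map(columns_old):
--     return {col: _pretty(col) for col in columns_old}
-- ===== Notes on version B (the rewrite author's own statement) =====
-- stated objective: alternative
-- what changed: Replaces A's five sequential whole-string .replace() passes per column with a single explicit character-by-character scan that classifies each character once and accumulates the output pieces, joined at the end; the mapping is built by a dict comprehension over this helper.
import Mathlib
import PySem

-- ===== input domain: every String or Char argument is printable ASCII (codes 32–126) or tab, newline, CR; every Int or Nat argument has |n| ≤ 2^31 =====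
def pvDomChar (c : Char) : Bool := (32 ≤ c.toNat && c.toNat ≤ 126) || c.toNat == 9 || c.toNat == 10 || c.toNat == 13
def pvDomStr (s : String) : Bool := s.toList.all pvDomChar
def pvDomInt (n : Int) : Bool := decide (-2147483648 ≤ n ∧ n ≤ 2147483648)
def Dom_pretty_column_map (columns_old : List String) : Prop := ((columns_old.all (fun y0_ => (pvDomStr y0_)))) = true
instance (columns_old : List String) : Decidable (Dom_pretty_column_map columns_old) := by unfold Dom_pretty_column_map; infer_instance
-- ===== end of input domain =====

-- B replaces A's five sequential whole-string replace passes per column by ONE explicit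
-- character-by-character scan with an accumulator of output pieces joined at the end; objective: alternative.

-- ===== PORT A =====
-- A's five chained replace calls, in A's order
def pvReplChain (col : String) : String :=
  PySem.Str.replace (PySem.Str.replace (PySem.Str.replace (PySem.Str.replace
    (PySem.Str.replace col "_" "|") "-" "|") " " "||") "(" " ") ")" ""

def pretty_column_map (columns_old : List String) : List (String × String) :=
  (columns_old.foldl (fun colmap col => colmap.insert col (pvReplChain col))
    (PySem.Dict.empty : PySem.Dict String String)).items

-- ===== PORT B =====
-- Source B's _pretty: one explicit scan over the characters, appending output pieces, joined at the end
def pvPretty (col : String) : String :=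
  PySem.Str.join "" (col.toList.foldl (fun pieces c =>
    if c = '_' ∨ c = '-' then pieces ++ ["|"]
    else if c = ' ' then pieces ++ ["||"]
    else if c = '(' then pieces ++ [" "]
    else if c = ')' then pieces
    else pieces ++ [String.ofList [c]]) [])

-- the dict comprehension of Source B
def pretty_column_map_alt (columns_old : List String) : List (String × String) :=
  (PySem.Dict.ofList (columns_old.map (fun col => (col, pvPretty col)))).items

-- ===== PRECONDITION & SPEC =====
def Spec_pretty_column_map (columns_old : List String) (out : List (String × String)) : Prop := out = pretty_column_map_alt columns_old
instance (columns_old : List String) (out : List (String × String)) : Decidable (Spec_pretty_column_map columns_old out) := by unfold Spec_pretty_column_map; infer_instance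

-- ===== CLAIM =====
def Claim_equal_pretty_column_map : Prop := ∀ (columns_old : List String), Dom_pretty_column_map columns_old → Spec_pretty_column_map columns_old (pretty_column_map columns_old)

-- ===== LEMMAS AND PROOFS =====

-- the per-character effect both programs realise
def pvTrChar (c : Char) : List Char :=
  if c = '_' then ['|'] else if c = '-' then ['|'] else if c = ' ' then ['|', '|']
  else if c = '(' then [' '] else if c = ')' then [] else [c]

-- replace.go with a one-char pattern is a per-character flatMap
theorem pv_go_single (o : Char) (new : List Char) :
    ∀ (l : List Char) (fuel : Nat) (acc : List Char), l.length ≤ fuel →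
      PySem.Chars.replace.go [o] new fuel l acc
        = acc.reverse ++ l.flatMap (fun c => if c = o then new else [c]) := by
  intro l
  induction l with
  | nil =>
    intro fuel acc _
    cases fuel <;> simp [PySem.Chars.replace.go]
  | cons c t ih =>
    intro fuel acc hle
    cases fuel with
    | zero => simp at hle
    | succ fuel =>
      by_cases hc : c = o
      · subst hc
        have hpre : List.isPrefixOf [c] (c :: t) = true := by simp [List.isPrefixOf]
        simp only [PySem.Chars.replace.go, hpre, if_true, List.drop_succ_cons, List.drop_zero,
          List.length_nil, List.length_cons]
        rw [ih fuel _ (by simpa using hle)]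
        simp
      · have hpre : List.isPrefixOf [o] (c :: t) = false := by
          simp [List.isPrefixOf, Ne.symm hc]
        simp only [PySem.Chars.replace.go, hpre, Bool.false_eq_true, if_false]
        rw [ih fuel _ (by simpa using hle)]
        simp [hc]

-- Python's s.replace(old, new) with a one-char old, as a flatMap over the characters
theorem pv_replace_single (s : List Char) (o : Char) (new : List Char) :
    PySem.Chars.replace s [o] new = s.flatMap (fun c => if c = o then new else [c]) := by
  rw [PySem.Chars.replace]
  simp only [List.isEmpty_cons, Bool.false_eq_true, if_false]
  simpa using pv_go_single o new s s.length [] le_rfl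

-- A's five sequential one-char replaces, as one flatMap
theorem pv_chain_eq_flatMap (col : String) :
    pvReplChain col = String.ofList (col.toList.flatMap pvTrChar) := by
  unfold pvReplChain
  simp only [PySem.Str.replace, String.toList_ofList]
  apply congrArg String.ofList
  show PySem.Chars.replace (PySem.Chars.replace (PySem.Chars.replace (PySem.Chars.replace
    (PySem.Chars.replace col.toList ['_'] ['|']) ['-'] ['|']) [' '] ['|','|']) ['('] [' '])
    [')'] [] = _
  rw [pv_replace_single, pv_replace_single, pv_replace_single, pv_replace_single,
      pv_replace_single]
  rw [List.flatMap_assoc, List.flatMap_assoc, List.flatMap_assoc, List.flatMap_assoc]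
  apply List.flatMap_congr
  intro c _
  by_cases h1 : c = '_'
  · subst h1; decide
  by_cases h2 : c = '-'
  · subst h2; decide
  by_cases h3 : c = ' '
  · subst h3; decide
  by_cases h4 : c = '('
  · subst h4; decide
  by_cases h5 : c = ')'
  · subst h5; decide
  simp [pvTrChar, h1, h2, h3, h4, h5]

-- the string pieces B appends for one character
def pvPieceOf (c : Char) : List String :=
  if c = '_' ∨ c = '-' then ["|"] else if c = ' ' then ["||"]
  else if c = '(' then [" "] else if c = ')' then [] else [String.ofList [c]]

-- joining on the empty separator is concatenation
theorem pv_join_empty (css : List (List Char)) : PySem.Chars.join [] css = css.flatten := by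
  induction css with
  | nil => simp [PySem.Chars.join_nil]
  | cons p t ih =>
    cases t with
    | nil => simp [PySem.Chars.join_singleton]
    | cons q r => rw [PySem.Chars.join_cons_cons]; simp [ih]

-- B's scan equals the same flatMap
theorem pv_pretty_eq_flatMap (col : String) :
    pvPretty col = String.ofList (col.toList.flatMap pvTrChar) := by
  unfold pvPretty
  have hstep : (fun (pieces : List String) c =>
      if c = '_' ∨ c = '-' then pieces ++ ["|"]
      else if c = ' ' then pieces ++ ["||"]
      else if c = '(' then pieces ++ [" "]
      else if c = ')' then pieces
      else pieces ++ [String.ofList [c]])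
      = (fun pieces c => pieces ++ pvPieceOf c) := by
    funext pieces c
    unfold pvPieceOf
    split_ifs <;> simp
  rw [hstep, PySem.List.foldl_append_eq_flatMap]
  simp only [List.nil_append, PySem.Str.join]
  apply congrArg String.ofList
  rw [show ("" : String).toList = [] from rfl, pv_join_empty]
  simp only [List.flatten_eq_flatMap, List.map_flatMap, List.flatMap_assoc]
  apply List.flatMap_congr
  intro c _
  by_cases h1 : c = '_'
  · subst h1; decide
  by_cases h2 : c = '-'
  · subst h2; decide
  by_cases h3 : c = ' '
  · subst h3; decide
  by_cases h4 : c = '('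
  · subst h4; decide
  by_cases h5 : c = ')'
  · subst h5; decide
  simp [pvPieceOf, pvTrChar, h1, h2, h3, h4, h5]

theorem pv_chain_eq_pretty (col : String) : pvReplChain col = pvPretty col := by
  rw [pv_chain_eq_flatMap, pv_pretty_eq_flatMap]

-- ===== VERDICT =====
theorem pretty_column_map_spec : Claim_equal_pretty_column_map := by
  intro columns_old _
  unfold Spec_pretty_column_map pretty_column_map pretty_column_map_alt
  rw [PySem.Dict.ofList, PySem.Dict.update, List.foldl_map]
  have hfun : (fun (colmap : PySem.Dict String String) col => colmap.insert col (pvReplChain col))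
      = (fun colmap col => colmap.insert col (pvPretty col)) := by
    funext d col; rw [pv_chain_eq_pretty]
  rw [hfun]
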